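-- pv_equiv track=rewrite | github.com/I-Muxettieri/sub-autofixer | utils.py | slipt_stags
-- ===== SOURCE A (Python) =====
-- def slipt_stags(text: str) -> tuple[str, str]:
--     start_tags = ""
--     tag_section = False
--     for i, char in enumerate(text):
--         if char == "{":
--             tag_section = True
--             start_tags += char
--         elif char == "}":
--             tag_section = False
--             start_tags += char
--         elif tag_section:
--             start_tags += char
--         elif not tag_section:
--             return (start_tags, text[i:].strip())
--     return ("", "")
-- ===== SOURCE B (Python) =====
-- def slipt_stags(text: str) -> tuple[str, str]:
--     p, n = 0, len(text)
--     while p < n: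
--         c = text[p]
--         if c == '}':
--             p += 1
--         elif c == '{':
--             q = text.find('}', p + 1)
--             if q == -1:
--                 return ("", "")
--             p = q + 1
--         else:
--             return (text[:p], text[p:].strip())
--     return ("", "")
-- ===== Notes on version B (the rewrite author's own statement) =====
-- stated objective: alternative
-- what changed: A's char-by-char enumerate loop with a tag_section flag and an accumulated prefix string is replaced by an index that jumps over whole '{...}' groups using str.find and slices the answer out of the original string at the end.
import Mathlib
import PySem

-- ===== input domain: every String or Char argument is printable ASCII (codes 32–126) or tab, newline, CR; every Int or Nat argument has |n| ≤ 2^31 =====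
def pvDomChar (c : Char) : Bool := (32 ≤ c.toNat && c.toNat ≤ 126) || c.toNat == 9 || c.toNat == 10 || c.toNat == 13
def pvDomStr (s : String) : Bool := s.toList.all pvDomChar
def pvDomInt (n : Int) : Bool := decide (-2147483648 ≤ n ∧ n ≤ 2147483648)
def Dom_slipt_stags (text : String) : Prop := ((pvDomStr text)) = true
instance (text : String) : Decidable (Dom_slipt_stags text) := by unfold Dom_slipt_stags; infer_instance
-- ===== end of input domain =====

-- B replaces A's char-by-char state machine with position jumps via str.find (alternative decomposition; not claimed faster).

-- ===== PORT A =====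
-- the enumerate loop: i is the index, rest the not-yet-visited suffix, startTags/tagSection the loop state
def slipt_stagsGo (text : List Char) : Nat → List Char → List Char → Bool → String × String
  | _, [], _, _ => ("", "")
  | i, c :: rest, startTags, tagSection =>
    if c = '{' then slipt_stagsGo text (i+1) rest (startTags ++ [c]) true
    else if c = '}' then slipt_stagsGo text (i+1) rest (startTags ++ [c]) false
    else if tagSection then slipt_stagsGo text (i+1) rest (startTags ++ [c]) tagSection
    else (String.mk startTags, String.mk (PySem.Chars.strip (text.drop i)))

def slipt_stags (text : String) : String × String :=
  slipt_stagsGo text.toList 0 text.toList [] false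

-- ===== PORT B =====
-- bound used by the termination argument of the while loop below
theorem slipt_stags_find_bounds (cs : List Char) (p : Nat) (hp : p < cs.length)
    (h : PySem.Chars.findFrom cs ['}'] ((p : Int) + 1) none ≠ -1) :
    p + 1 ≤ (PySem.Chars.findFrom cs ['}'] ((p : Int) + 1) none).toNat ∧
    (PySem.Chars.findFrom cs ['}'] ((p : Int) + 1) none).toNat < cs.length := by
  have hk : (p + 1 : Nat) ≤ cs.length := hp
  have hcast : ((p : Int) + 1) = ((p + 1 : Nat) : Int) := by push_cast; ring
  rw [hcast] at h ⊢
  obtain ⟨h1, h2, -⟩ := PySem.Chars.findFrom_natCast_spec cs ['}'] (p+1) hk h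
  have hnn : (0 : Int) ≤ PySem.Chars.findFrom cs ['}'] ((p + 1 : Nat) : Int) none := by
    exact le_trans (by positivity) h1
  refine ⟨by omega, ?_⟩
  rcases h2 with ⟨t, ht⟩
  have hlt : (PySem.Chars.findFrom cs ['}'] ((p + 1 : Nat) : Int) none).toNat <
      (cs.drop (PySem.Chars.findFrom cs ['}'] ((p + 1 : Nat) : Int) none).toNat).length +
      (PySem.Chars.findFrom cs ['}'] ((p + 1 : Nat) : Int) none).toNat := by
    rw [← ht]; simp
  simpa using hlt

-- the while loop of B: p jumps over '}' and whole '{…}' groups found with str.find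
def slipt_stags_altGo (cs : List Char) (p : Nat) : String × String :=
  if hp : p < cs.length then
    let c := cs[p]
    if c = '}' then slipt_stags_altGo cs (p + 1)
    else if hc : c = '{' then
      let q := PySem.Chars.findFrom cs ['}'] ((p : Int) + 1) none
      if hq : q = -1 then ("", "")
      else slipt_stags_altGo cs (q.toNat + 1)
    else (String.mk (cs.take p), String.mk (PySem.Chars.strip (cs.drop p)))
  else ("", "")
termination_by cs.length - p
decreasing_by
  · omega
  · have := slipt_stags_find_bounds cs p hp hq
    omega

def slipt_stags_alt (text : String) : String × String :=
  slipt_stags_altGo text.toList 0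

-- ===== PRECONDITION & SPEC =====
def Spec_slipt_stags (text : String) (out : String × String) : Prop := out = slipt_stags_alt text
instance (text : String) (out : String × String) : Decidable (Spec_slipt_stags text out) := by unfold Spec_slipt_stags; infer_instance

-- ===== CLAIM (what is proved, stated in full; the proofs are below) =====
def Claim_equal_slipt_stags : Prop := ∀ (text : String), Dom_slipt_stags text → Spec_slipt_stags text (slipt_stags text)

-- ===== LEMMAS AND PROOFS =====

theorem pv_drop_cons {α : Type} {l : List α} {j : Nat} {c : α} {rest : List α}
    (h : l.drop j = c :: rest) :
    j < l.length ∧ l[j]? = some c ∧ l.drop (j+1) = rest ∧ l.take (j+1) = l.take j ++ [c] := by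
  have hj : j < l.length := by
    by_contra hge
    rw [List.drop_eq_nil_of_le (by omega)] at h
    exact (List.cons_ne_nil _ _) h.symm
  have hget : l[j]? = some c := by
    have h0 : (l.drop j)[0]? = some c := by rw [h]; rfl
    have h1 : l[j + 0]? = some c := by rw [← List.getElem?_drop]; exact h0
    simpa using h1
  refine ⟨hj, hget, ?_, ?_⟩
  · have h2 : l.drop (j+1) = (l.drop j).drop 1 := by rw [List.drop_drop]
    rw [h2, h]; rfl
  · rw [List.take_succ, hget]; rfl

-- first-occurrence facts of findIdx?, in getElem? form
theorem pv_findIdx?_facts : ∀ (l : List Char) (k : Nat),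
    l.findIdx? (· = '}') = some k →
    l[k]? = some '}' ∧ ∀ i, i < k → l[i]? ≠ some '}' := by
  intro l
  induction l with
  | nil => intro k h; simp at h
  | cons c rest ih =>
    intro k h
    rw [List.findIdx?_cons] at h
    by_cases hc : c = '}'
    · subst hc
      simp at h
      subst h
      exact ⟨rfl, by omega⟩
    · obtain ⟨k', hk', rfl⟩ : ∃ a, rest.findIdx? (· = '}') = some a ∧ a + 1 = k := by
        cases hrest : rest.findIdx? (· = '}') with
        | none => rw [hrest] at h; simp [hc] at h
        | some a => rw [hrest] at h; simp [hc] at h; exact ⟨a, rfl, h⟩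
      obtain ⟨h1, h2⟩ := ih k' hk'
      refine ⟨by simpa using h1, ?_⟩
      intro i hi
      cases i with
      | zero => simpa using hc
      | succ i' => simpa using h2 i' (by omega)

-- bridge: Chars.find with a singleton needle is findIdx?
theorem pv_find_singleton (l : List Char) :
    PySem.Chars.find l ['}'] =
      (match l.findIdx? (· = '}') with | none => (-1 : Int) | some k => (k : Int)) := by
  cases hfi : l.findIdx? (· = '}') with
  | none =>
    have hnm : '}' ∉ l := by
      intro hm
      have := List.findIdx?_eq_none_iff.mp hfi '}' hm
      simp at this
    have hni : ¬ ['}'] <:+: l := fun hinf => hnm (hinf.subset (by simp))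
    simpa using (PySem.Chars.find_eq_neg_one_iff l ['}']).mpr hni
  | some k =>
    obtain ⟨hkc, hmin⟩ := pv_findIdx?_facts l k hfi
    have hklen : k < l.length := (List.getElem?_eq_some_iff.mp hkc).1
    have hinf : ['}'] <:+: l := by
      refine ⟨l.take k, l.drop (k+1), ?_⟩
      have h1 : l.take k ++ ['}'] = l.take (k+1) := by
        rw [List.take_succ, hkc]; rfl
      rw [h1, List.take_append_drop]
    have hnn : 0 ≤ PySem.Chars.find l ['}'] := (PySem.Chars.find_nonneg_iff l ['}']).mpr hinf
    obtain ⟨hpre, hfirst⟩ := PySem.Chars.find_spec (s := l) (sub := ['}']) hnn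
    set f := (PySem.Chars.find l ['}']).toNat with hf
    have hfc : l[f]? = some '}' := by
      rcases hpre with ⟨t, ht⟩
      have h0 : (l.drop f)[0]? = some '}' := by rw [← ht]; rfl
      have h1 : l[f + 0]? = some '}' := by rw [← List.getElem?_drop]; exact h0
      simpa using h1
    have hfk : f = k := by
      rcases lt_trichotomy f k with h | h | h
      · exact absurd hfc (hmin f h)
      · exact h
      · exfalso
        refine hfirst k h ?_
        refine ⟨l.drop (k+1), ?_⟩
        have hd : l.drop k = '}' :: l.drop (k+1) := by
          have hv : l[k] = '}' := (List.getElem?_eq_some_iff.mp hkc).2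
          rw [List.drop_eq_getElem_cons hklen, hv]
        simp [hd]
    show PySem.Chars.find l ['}'] = (k : Int)
    omega

-- A's loop inside a tag section: it consumes everything up to (and incl.) the first '}' after j
theorem pv_aGo_inTag : ∀ (fuel : Nat) (text : List Char) (j : Nat), text.length - j ≤ fuel →
    slipt_stagsGo text j (text.drop j) (text.take j) true =
      (match (text.drop j).findIdx? (· = '}') with
       | none => (("", "") : String × String)
       | some k => slipt_stagsGo text (j+k+1) (text.drop (j+k+1)) (text.take (j+k+1)) false) := by
  intro fuel
  induction fuel with
  | zero =>
    intro text j hf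
    have hnil : text.drop j = [] := List.drop_eq_nil_of_le (by omega)
    rw [hnil]
    simp [slipt_stagsGo]
  | succ n ih =>
    intro text j hf
    cases hd : text.drop j with
    | nil => simp [slipt_stagsGo]
    | cons c rest =>
      obtain ⟨hj, hget, hdrop1, htake1⟩ := pv_drop_cons hd
      by_cases hc : c = '}'
      · subst hc
        simp only [slipt_stagsGo, if_neg (by decide : ¬ ('}' = '{')), if_pos rfl,
          List.findIdx?_cons]
        simp only [decide_true, cond_true]
        rw [← htake1, ← hdrop1]
        norm_num
      · have hrec : slipt_stagsGo text j (c :: rest) (text.take j) true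
            = slipt_stagsGo text (j+1) rest (text.take j ++ [c]) true := by
          by_cases hob : c = '{'
          · subst hob; simp [slipt_stagsGo]
          · simp [slipt_stagsGo, hob, hc]
        rw [hrec, ← htake1, ← hdrop1]
        have hlen : text.length - (j+1) ≤ n := by
          have := List.length_drop (l := text) (i := j)
          omega
        rw [ih text (j+1) hlen]
        have hsplit : (c :: text.drop (j+1)).findIdx? (· = '}')
            = ((text.drop (j+1)).findIdx? (· = '}')).map (· + 1) := by
          rw [List.findIdx?_cons]; simp [hc]
        rw [hsplit]
        cases (text.drop (j+1)).findIdx? (· = '}') with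
        | none => rfl
        | some k =>
          simp only [Option.map_some]
          have e : j + (k+1) + 1 = j + 1 + k + 1 := by omega
          rw [e]

-- main loop equivalence, out of a tag section
theorem pv_main : ∀ (fuel : Nat) (text : List Char) (j : Nat), text.length - j ≤ fuel →
    slipt_stagsGo text j (text.drop j) (text.take j) false = slipt_stags_altGo text j := by
  intro fuel
  induction fuel with
  | zero =>
    intro text j hf
    have hnil : text.drop j = [] := List.drop_eq_nil_of_le (by omega)
    rw [hnil, slipt_stags_altGo]
    simp [slipt_stagsGo, dif_neg (by omega : ¬ j < text.length)]
  | succ n ih =>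
    intro text j hf
    cases hd : text.drop j with
    | nil =>
      have hge : text.length ≤ j := List.drop_eq_nil_iff.mp hd
      rw [slipt_stags_altGo]
      simp [slipt_stagsGo, dif_neg (by omega : ¬ j < text.length)]
    | cons c rest =>
      obtain ⟨hj, hget, hdrop1, htake1⟩ := pv_drop_cons hd
      have hgetv : text[j] = c := by
        have h0 := List.getElem?_eq_getElem hj
        rw [h0] at hget
        exact Option.some.inj hget
      have hlen1 : text.length - (j+1) ≤ n := by
        have := List.length_drop (l := text) (i := j)
        omega
      rw [slipt_stags_altGo, dif_pos hj]
      by_cases hc : c = '}'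
      · subst hc
        simp only [slipt_stagsGo, if_neg (by decide : ¬ ('}' = '{')), if_pos rfl]
        rw [← htake1, ← hdrop1, ih text (j+1) hlen1]
        simp [hgetv]
      · by_cases hob : c = '{'
        · subst hob
          have hstep : slipt_stagsGo text j ('{' :: rest) (text.take j) false
              = slipt_stagsGo text (j+1) rest (text.take j ++ ['{']) true := by
            simp [slipt_stagsGo]
          rw [hstep, ← htake1, ← hdrop1, pv_aGo_inTag n text (j+1) hlen1]
          have hk : (j + 1 : Nat) ≤ text.length := hj
          have hcast : ((j : Int) + 1) = ((j + 1 : Nat) : Int) := by push_cast; ring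
          have hff := PySem.Chars.findFrom_natCast text ['}'] (j+1) hk
          have hfind := pv_find_singleton (text.drop (j+1))
          cases hfi : (text.drop (j+1)).findIdx? (· = '}') with
          | none =>
            have hfneg : PySem.Chars.find (text.drop (j+1)) ['}'] = -1 := by
              rw [hfind, hfi]
            have hqneg : PySem.Chars.findFrom text ['}'] ((j + 1 : Nat) : Int) none = -1 := by
              rw [hff, if_pos hfneg]
            rw [hgetv, if_neg (by decide : ¬ ('{' : Char) = '}'), dif_pos rfl, hcast,
              dif_pos hqneg]
          | some k =>
            have hfpos : PySem.Chars.find (text.drop (j+1)) ['}'] = (k : Int) := by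
              rw [hfind, hfi]
            have hq : PySem.Chars.findFrom text ['}'] ((j + 1 : Nat) : Int) none = ((j+1+k : Nat) : Int) := by
              rw [hff, hfpos, if_neg (by omega : ¬ ((k : Int) = -1))]
              push_cast; ring
            have hne : ¬ PySem.Chars.findFrom text ['}'] ((j + 1 : Nat) : Int) none = -1 := by
              rw [hq]; intro hcon; omega
            have hkbound : k < (text.drop (j+1)).length :=
              (List.getElem?_eq_some_iff.mp (pv_findIdx?_facts _ k hfi).1).1
            have hfl : text.length - (j+1+k+1) ≤ n := by
              rw [List.length_drop] at hkbound
              omega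
            rw [hgetv, if_neg (by decide : ¬ ('{' : Char) = '}'), dif_pos rfl, hcast,
              dif_neg hne, hq, Int.toNat_natCast]
            exact ih text (j+1+k+1) hfl
        · simp only [slipt_stagsGo, if_neg hob, if_neg hc,
            if_neg (by simp : ¬ (false = true))]
          simp [hgetv, hob, hc]

-- ===== VERDICT (by name: the statement is the Claim_ definition above) =====
theorem slipt_stags_spec : Claim_equal_slipt_stags := by
  intro text _
  unfold Spec_slipt_stags slipt_stags slipt_stags_alt
  have h := pv_main text.toList.length text.toList 0 (by omega)
  simpa using h
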